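-- pv_equiv track=rewrite | github.com/GuiMiran/SourceCodeSogeti | Code_Challengue6.py | barajar
-- ===== SOURCE A (Python) =====
-- def barajar(baraj):
--     baraj2=[]
--     while len(baraj)>0:
--         for i in baraj:
--             if (i in baraj):
--                 #if (encontrarCarta(baraj,i)):
--                 baraj2.append(i)
--                 baraj.remove(i)
--     return baraj2
-- ===== SOURCE B (Python) =====
-- def barajar(baraj):
--     # One pass per round: the values A emits in a round are exactly the
--     # even-position elements of the current list, and A's remove-first calls
--     # delete, for each value, its earliest copies.  So: emit cur[0::2], then
--     # drop the earliest Counter(cur[0::2]) copies of each value in one scan.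
--     # (Unlike A, this does not mutate the argument list.)
--     out = []
--     cur = list(baraj)
--     while cur:
--         ev = cur[0::2]
--         out += ev
--         need = {}
--         for x in ev:
--             need[x] = need.get(x, 0) + 1
--         nxt = []
--         for x in cur:
--             if need.get(x, 0) > 0:
--                 need[x] = need.get(x, 0) - 1
--             else:
--                 nxt.append(x)
--         cur = nxt
--     return out
-- ===== Notes on version B (the rewrite author's own statement) =====
-- stated objective: faster
-- what changed: Replaces A's mutate-while-iterating passes with quadratic list.remove scans by a proved characterisation: each round emits the even-position elements via one slice and drops the earliest emitted copies via a counter dictionary in one linear scan.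
import Mathlib
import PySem

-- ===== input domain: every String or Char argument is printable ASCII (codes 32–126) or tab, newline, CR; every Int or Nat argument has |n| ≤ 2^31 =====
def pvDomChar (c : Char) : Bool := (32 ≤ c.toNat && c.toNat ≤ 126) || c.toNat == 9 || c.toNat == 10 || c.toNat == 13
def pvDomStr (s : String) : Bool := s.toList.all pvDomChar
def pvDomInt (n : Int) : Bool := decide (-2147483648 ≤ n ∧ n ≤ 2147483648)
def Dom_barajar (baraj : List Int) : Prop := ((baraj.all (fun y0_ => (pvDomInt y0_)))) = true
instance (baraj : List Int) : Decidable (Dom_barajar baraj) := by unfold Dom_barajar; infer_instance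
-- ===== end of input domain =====

-- B replaces A's quadratic remove-first passes by one linear counter scan per round
-- (proved equal); A empties its argument list in place, B does not — the equivalence
-- proved here is about the return value only.

-- ===== PORT A =====
-- Python's `for i in baraj:` over a list mutated by `baraj.remove(i)` advances an index k
-- over the shrinking list; each step reads baraj[k], appends it, removes its first occurrence.
-- The Nat fuel only totalizes the loop (one unit per iteration; k grows by 1 every step, so
-- cur.length units suffice); `.getD cur` only totalizes remove? (the branch guarantees i ∈ cur).
def barajarPass : Nat → List Int → Nat → List Int → List Int × List Int
  | 0, cur, _, out => (cur, out)
  | fuel + 1, cur, k, out =>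
    if h : k < cur.length then
      let i := cur[k]
      if i ∈ cur then
        barajarPass fuel ((PySem.List.remove? cur i).getD cur) (k + 1) (out ++ [i])
      else
        barajarPass fuel cur (k + 1) out   -- unreachable: i was read from cur
    else
      (cur, out)

-- while len(baraj) > 0: one pass (fuel: each pass removes at least one element)
def barajarLoop : Nat → List Int → List Int → List Int
  | 0, _, out => out
  | fuel + 1, cur, out =>
    if 0 < cur.length then
      let r := barajarPass cur.length cur 0 out
      barajarLoop fuel r.1 r.2
    else
      out

def barajar (baraj : List Int) : List Int :=
  barajarLoop (baraj.length + 1) baraj []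

-- ===== PORT B =====
-- cur[0::2] (every other element starting at index 0)
def pyEvens : List Int → List Int
  | [] => []
  | [x] => [x]
  | x :: _ :: rest => x :: pyEvens rest

-- need = {}; for x in ev: need[x] = need.get(x, 0) + 1
def buildNeed (ev : List Int) : PySem.Dict Int Int :=
  ev.foldl (fun d x => d.insert x (d.getD x 0 + 1)) PySem.Dict.empty

-- for x in cur: if need.get(x,0) > 0: need[x] -= 1 else: nxt.append(x)
def dropNeed : List Int → PySem.Dict Int Int → List Int
  | [], _ => []
  | x :: xs, d =>
      if d.getD x 0 > 0 then dropNeed xs (d.insert x (d.getD x 0 - 1))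
      else x :: dropNeed xs d

-- while cur: … (fuel only totalizes the loop; every round drops at least the head)
def barajarAltLoop : Nat → List Int → List Int → List Int
  | 0, _, out => out
  | fuel + 1, cur, out =>
    match cur with
    | [] => out
    | x :: xs =>
        let ev := pyEvens (x :: xs)
        let nxt := dropNeed (x :: xs) (buildNeed ev)
        barajarAltLoop fuel nxt (out ++ ev)

def barajar_alt (baraj : List Int) : List Int :=
  barajarAltLoop (baraj.length + 1) baraj []

-- ===== PRECONDITION & SPEC =====
def Spec_barajar (baraj : List Int) (out : List Int) : Prop := out = barajar_alt baraj
instance (baraj : List Int) (out : List Int) : Decidable (Spec_barajar baraj out) := by unfold Spec_barajar; infer_instance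

-- ===== CLAIM (what is proved, stated in full; the proofs are below) =====
def Claim_equal_barajar : Prop := ∀ (baraj : List Int), Dom_barajar baraj → Spec_barajar baraj (barajar baraj)

-- ===== LEMMAS AND PROOFS =====

theorem removeGetD_eq_erase (cur : List Int) (i : Int) (hm : i ∈ cur) :
    (PySem.List.remove? cur i).getD cur = cur.erase i := by
  rw [PySem.List.remove?_eq_some_erase _ _ hm]; rfl

-- abstract counter-removal: drop, for each value v, the earliest (c v) copies of v
def crem : List Int → (Int → Nat) → List Int
  | [], _ => []
  | x :: xs, c =>
      if c x > 0 then crem xs (fun y => if y = x then c y - 1 else c y)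
      else x :: crem xs c

theorem crem_zero (l : List Int) : crem l (fun _ => 0) = l := by
  induction l with
  | nil => rfl
  | cons x xs ih => simp [crem, ih]

theorem dropNeed_eq_crem : ∀ (l : List Int) (d : PySem.Dict Int Int),
    dropNeed l d = crem l (fun y => (d.getD y 0).toNat) := by
  intro l
  induction l with
  | nil => intro d; rfl
  | cons x xs ih =>
    intro d
    rw [dropNeed, crem]
    by_cases h : (0 : Int) < d.getD x 0
    · rw [if_pos h, if_pos (by omega : 0 < (d.getD x 0).toNat), ih]
      congr 1
      funext y
      rw [PySem.Dict.getD_insert]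
      by_cases hy : y = x <;> simp [hy]
    · rw [if_neg h, if_neg (by omega : ¬ 0 < (d.getD x 0).toNat), ih]

theorem crem_erase : ∀ (l : List Int) (i : Int) (c : Int → Nat),
    crem (l.erase i) c = crem l (fun y => if y = i then c y + 1 else c y) := by
  intro l
  induction l with
  | nil => intro i c; rfl
  | cons x xs ih =>
    intro i c
    by_cases hx : x = i
    · subst hx
      rw [List.erase_cons_head]
      rw [crem, if_pos (by simp : 0 < (if x = x then c x + 1 else c x))]
      congr 1
      funext y
      split_ifs <;> simp_all
    · rw [List.erase_cons_tail (by simpa using (Ne.intro hx))]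
      rw [crem, crem]
      have hcx : (if x = i then c x + 1 else c x) = c x := by simp [hx]
      rw [hcx]
      by_cases h : 0 < c x
      · rw [if_pos h, if_pos h, ih]
        congr 1
        funext y
        split_ifs <;> simp_all
      · rw [if_neg h, if_neg h, ih]

theorem mem_take_succ_self (cur : List Int) (k : Nat) (h : k < cur.length) :
    cur[k] ∈ cur.take (k + 1) := by
  have hk : k < (cur.take (k + 1)).length := by
    simp only [List.length_take]
    omega
  have : (cur.take (k + 1))[k] = cur[k] := List.getElem_take
  exact this ▸ List.getElem_mem hk

theorem drop_erase : ∀ (l : List Int) (n : Nat) (i : Int),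
    i ∈ l.take (n + 1) → (l.erase i).drop (n + 1) = l.drop (n + 2) := by
  intro l
  induction l with
  | nil => intro n i h; simp at h
  | cons x xs ih =>
    intro n i h
    by_cases hx : x = i
    · subst hx
      rw [List.erase_cons_head]
      simp [List.drop_succ_cons]
    · rw [List.erase_cons_tail (by simpa using (Ne.intro hx))]
      rw [List.take_succ_cons] at h
      have hi : i ∈ xs.take n := by
        rcases List.mem_cons.mp h with h1 | h2
        · exact absurd h1.symm hx
        · exact h2
      match n with
      | 0 => simp at hi
      | m + 1 =>
        have := ih m i hi
        simpa [List.drop_succ_cons] using this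

theorem pyEvens_drop (cur : List Int) (k : Nat) (h : k < cur.length) :
    pyEvens (cur.drop k) = cur[k] :: pyEvens (cur.drop (k + 2)) := by
  have hd : cur.drop k = cur[k] :: cur.drop (k + 1) := List.drop_eq_getElem_cons h
  have hd2 : cur.drop (k + 2) = (cur.drop (k + 1)).drop 1 := by
    rw [List.drop_drop]
  cases he : cur.drop (k + 1) with
  | nil => rw [hd, he, hd2, he]; rfl
  | cons y rest => rw [hd, he, hd2, he]; rfl

theorem count_cons_fun (i : Int) (E : List Int) :
    (fun y => (i :: E).count y) = (fun y => if y = i then E.count y + 1 else E.count y) := by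
  funext y
  rw [List.count_cons]
  by_cases hy : y = i
  · simp [hy]
  · simp [hy, Ne.symm hy]

theorem barajarPass_spec : ∀ (fuel : Nat) (cur : List Int) (k : Nat) (out : List Int),
    cur.length - k ≤ fuel →
    barajarPass fuel cur k out =
      (crem cur (fun y => (pyEvens (cur.drop k)).count y), out ++ pyEvens (cur.drop k)) := by
  intro fuel
  induction fuel with
  | zero =>
    intro cur k out hf
    have hnil : cur.drop k = [] := List.drop_eq_nil_of_le (by omega)
    rw [barajarPass, hnil]
    have hz : (fun y => (pyEvens []).count y) = (fun _ : Int => 0) := by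
      funext y; rfl
    rw [hz, crem_zero]
    simp [pyEvens]
  | succ fuel ih =>
    intro cur k out hf
    rw [barajarPass]
    by_cases h : k < cur.length
    · rw [dif_pos h]
      have hm : cur[k] ∈ cur := List.getElem_mem h
      simp only
      rw [if_pos hm, removeGetD_eq_erase cur cur[k] hm]
      have hlen : (cur.erase cur[k]).length = cur.length - 1 := List.length_erase_of_mem hm
      rw [ih (cur.erase cur[k]) (k + 1) (out ++ [cur[k]]) (by omega)]
      have hde : (cur.erase cur[k]).drop (k + 1) = cur.drop (k + 2) :=
        drop_erase cur k cur[k] (mem_take_succ_self cur k h)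
      rw [hde, pyEvens_drop cur k h, crem_erase]
      simp only [Prod.mk.injEq]
      constructor
      · rw [count_cons_fun]
      · simp
    · rw [dif_neg h]
      have hnil : cur.drop k = [] := List.drop_eq_nil_of_le (by omega)
      rw [hnil]
      have hz : (fun y => (pyEvens []).count y) = (fun _ : Int => 0) := by
        funext y; rfl
      rw [hz, crem_zero]
      simp [pyEvens]

theorem loops_eq : ∀ (fuel : Nat) (cur out : List Int),
    barajarLoop fuel cur out = barajarAltLoop fuel cur out := by
  intro fuel
  induction fuel with
  | zero => intro cur out; rfl
  | succ fuel ih =>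
    intro cur out
    match cur with
    | [] => rfl
    | x :: xs =>
      rw [barajarLoop, barajarAltLoop]
      simp only [List.length_cons, Nat.zero_lt_succ, if_pos]
      rw [barajarPass_spec (xs.length + 1) (x :: xs) 0 out (by simp)]
      rw [dropNeed_eq_crem, buildNeed, PySem.Dict.foldl_insert_getD_add_one_eq_counter]
      have hfun : (fun y => ((PySem.Dict.counter (pyEvens (x :: xs))).getD y 0).toNat)
          = (fun y => (pyEvens ((x :: xs).drop 0)).count y) := by
        funext y
        rw [PySem.Dict.getD_counter]
        simp
      rw [hfun]
      simp only [List.drop_zero]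
      exact ih _ _

-- ===== VERDICT (by name: the statement is the Claim_ definition above) =====
theorem barajar_spec : Claim_equal_barajar := by
  intro baraj _
  unfold Spec_barajar barajar barajar_alt
  exact loops_eq (baraj.length + 1) baraj []
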